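-- pv_equiv track=rewrite | github.com/PeytTheMate/Aegis | src/mcv/simple_yaml.py | _split_key_value
-- ===== SOURCE A (Python) =====
-- class YAMLParseError(ValueError):
--     """Raised when an input YAML document is not supported."""
--
-- def _split_key_value(text: str) -> tuple[str, str | None]:
--     in_single = False
--     in_double = False
--     escaped = False
--     for index, char in enumerate(text):
--         if escaped:
--             escaped = False
--             continue
--         if char == "\\":
--             escaped = True
--             continue
--         if char == "'" and not in_double:
--             in_single = not in_single
--             continue
--         if char == '"' and not in_single:
--             in_double = not in_double
--             continue
--         if char == ":" and not in_single and not in_double: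
--             key = text[:index].strip()
--             value = text[index + 1 :].strip()
--             return key, value if value else None
--     raise YAMLParseError(f"Expected key:value pair: {text}")
-- ===== SOURCE B (Python) =====
-- class YAMLParseError(ValueError):
--     """Raised when an input YAML document is not supported."""
--
-- def _split_key_value(text: str) -> "tuple[str, str | None]":
--     # Segment-skipping scan: instead of per-character quote/escape flags,
--     # jump over escape pairs and whole quoted runs with a cursor.
--     i, n = 0, len(text)
--     while i < n:
--         c = text[i]
--         if c == "\\":
--             i += 2
--         elif c == "'" or c == '"':
--             i += 1
--             while i < n and text[i] != c:
--                 i += 2 if text[i] == "\\" else 1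
--             i += 1
--         elif c == ":":
--             key = text[:i].strip()
--             value = text[i + 1 :].strip()
--             return key, value if value else None
--         else:
--             i += 1
--     raise YAMLParseError(f"Expected key:value pair: {text}")
-- ===== Notes on version B (the rewrite author's own statement) =====
-- stated objective: alternative
-- what changed: Replaces A's per-character scan carrying in_single/in_double/escaped boolean flags by a cursor scan that jumps over escape pairs (i += 2) and consumes whole quoted runs in a dedicated inner loop, so the outer loop never tracks quote state.
import Mathlib
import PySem

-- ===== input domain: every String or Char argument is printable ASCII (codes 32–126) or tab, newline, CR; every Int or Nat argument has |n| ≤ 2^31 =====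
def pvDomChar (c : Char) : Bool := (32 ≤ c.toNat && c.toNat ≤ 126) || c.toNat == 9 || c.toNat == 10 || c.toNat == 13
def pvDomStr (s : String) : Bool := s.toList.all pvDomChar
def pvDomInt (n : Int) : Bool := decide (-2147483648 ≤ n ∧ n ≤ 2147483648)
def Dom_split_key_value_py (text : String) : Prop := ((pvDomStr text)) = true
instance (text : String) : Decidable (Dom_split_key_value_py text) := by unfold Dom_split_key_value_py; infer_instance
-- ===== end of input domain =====

-- B replaces A's per-character quote/escape boolean-flag scan by a cursor that jumps over
-- escape pairs and whole quoted runs (objective: alternative); same return value wherever A returns.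

-- ===== PORT A =====
-- Literal port of A's enumerate loop with in_single/in_double/escaped flags.
-- Where the Python raises YAMLParseError (no unquoted colon), the port returns ("", none);
-- Pre_ excludes exactly those inputs.  text[:index]/text[index+1:] with 0 ≤ index < len
-- are List.take/List.drop (exact, index is in range); .strip() is PySem.Chars.strip.
def aLoop (text : List Char) (idx : Nat) (rest : List Char)
    (in_single in_double escaped : Bool) : String × Option String :=
  match rest with
  | [] => ("", none)
  | c :: rs =>
    if escaped then aLoop text (idx+1) rs in_single in_double false
    else if c = '\\' then aLoop text (idx+1) rs in_single in_double true
    else if c = '\'' ∧ in_double = false then aLoop text (idx+1) rs (!in_single) in_double escaped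
    else if c = '"' ∧ in_single = false then aLoop text (idx+1) rs in_single (!in_double) escaped
    else if c = ':' ∧ in_single = false ∧ in_double = false then
      let key := PySem.Chars.strip (text.take idx)
      let value := PySem.Chars.strip (text.drop (idx+1))
      (String.ofList key, if value = [] then none else some (String.ofList value))
    else aLoop text (idx+1) rs in_single in_double escaped
def split_key_value_py (text : String) : String × Option String :=
  aLoop text.toList 0 text.toList false false false

-- ===== PORT B =====
-- Port of Source B: a cursor scan; the inner while loop skips to the closing quote
-- (i += 2 on a backslash) and returns the cursor and the remaining suffix.
def bInner (q : Char) (i : Nat) : List Char → Nat × List Char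
  | [] => (i, [])
  | c :: rs =>
    if c = q then (i, c :: rs)
    else if c = '\\' then
      match rs with
      | [] => (i + 2, [])
      | _ :: rs' => bInner q (i+2) rs'
    else bInner q (i+1) rs

-- the inner while loop never lengthens the suffix it scans (needed for bOuter's termination)
theorem bInner_len_aux (q : Char) : ∀ n rest (i : Nat), rest.length ≤ n →
    (bInner q i rest).2.length ≤ rest.length := by
  intro n
  induction n with
  | zero =>
      intro rest i h
      have : rest = [] := List.length_eq_zero_iff.mp (Nat.le_zero.mp h)
      subst this; simp [bInner]
  | succ n ih =>
      intro rest i h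
      match rest with
      | [] => simp [bInner]
      | c :: rs =>
        rw [bInner.eq_def]
        by_cases hq : c = q
        · simp [hq]
        · by_cases hb : c = '\\'
          · subst hb
            match rs with
            | [] => simp [hq]
            | c' :: rs' =>
              have := ih rs' (i+2) (by simp at h ⊢; omega)
              simp [hq]
              try omega
          · have := ih rs (i+1) (by simp at h ⊢; omega)
            simp [hq, hb]
            try omega

theorem bInner_len (q : Char) (i : Nat) (rest : List Char) :
    (bInner q i rest).2.length ≤ rest.length :=
  bInner_len_aux q rest.length rest i (le_refl _)

-- the outer while loop of Source B
def bOuter (text : List Char) (i : Nat) (rest : List Char) : String × Option String :=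
  match rest with
  | [] => ("", none)
  | c :: rs =>
    if c = '\\' then
      match rs with
      | [] => ("", none)
      | _ :: rs' => bOuter text (i+2) rs'
    else if c = '\'' ∨ c = '"' then
      match h : bInner c (i+1) rs with
      | (_, []) => ("", none)
      | (j, _ :: rest') => bOuter text (j+1) rest'
    else if c = ':' then
      let key := PySem.Chars.strip (text.take i)
      let value := PySem.Chars.strip (text.drop (i+1))
      (String.ofList key, if value = [] then none else some (String.ofList value))
    else bOuter text (i+1) rs
termination_by rest.length
decreasing_by
  · simp
  · have := bInner_len c (i+1) rs
    rw [h] at this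
    simp at this ⊢
    omega
  · simp


def split_key_value_py_alt (text : String) : String × Option String :=
  bOuter text.toList 0 text.toList

-- ===== PRECONDITION & SPEC =====
-- Pre_ excludes exactly the inputs with no unquoted, unescaped colon, on which the Python A
-- raises YAMLParseError (B raises the same error there).
-- state machine: (escaped, open quote, colon found); found is sticky
def uqcStep (st : Bool × Option Char × Bool) (c : Char) : Bool × Option Char × Bool :=
  match st with
  | (_, _, true) => st
  | (true, q, _) => (false, q, false)
  | (false, none, _) =>
    if c = '\\' then (true, none, false)
    else if c = ':' then (false, none, true)
    else if c = '\'' then (false, some '\'', false)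
    else if c = '"' then (false, some '"', false)
    else (false, none, false)
  | (false, some q, _) =>
    if c = '\\' then (true, some q, false)
    else if c = q then (false, none, false)
    else (false, some q, false)

def Pre_split_key_value_py (text : String) : Prop :=
  (text.toList.foldl uqcStep (false, none, false)).2.2 = true

instance (text : String) : Decidable (Pre_split_key_value_py text) := by
  unfold Pre_split_key_value_py; infer_instance

def pvWitness_split_key_value_py : String := "key: 'a:b'"

def Spec_split_key_value_py (text : String) (out : String × Option String) : Prop := out = split_key_value_py_alt text
instance (text : String) (out : String × Option String) : Decidable (Spec_split_key_value_py text out) := by unfold Spec_split_key_value_py; infer_instance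

-- ===== CLAIM (what is proved, stated in full; the proofs are below) =====
def Claim_equal_split_key_value_py : Prop := ∀ (text : String), Dom_split_key_value_py text → Pre_split_key_value_py text → Spec_split_key_value_py text (split_key_value_py text)

-- ===== LEMMAS AND PROOFS =====
-- (A = B holds on every input: outside Pre_ both Pythons raise and both ports return ("", none).)

theorem quoted_single (text : List Char) :
    ∀ n rest i, rest.length ≤ n →
      aLoop text i rest true false false =
        (match bInner '\'' i rest with
         | (_, []) => (("" : String), (none : Option String))
         | (j, _ :: rs') => aLoop text (j+1) rs' false false false) := by
  intro n
  induction n with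
  | zero =>
      intro rest i h
      have : rest = [] := List.length_eq_zero_iff.mp (Nat.le_zero.mp h)
      subst this; simp [aLoop, bInner]
  | succ n ih =>
      intro rest i h
      match rest with
      | [] => simp [aLoop, bInner]
      | c :: rs =>
        rw [aLoop.eq_def, bInner.eq_def]
        by_cases hb : c = '\\'
        · subst hb
          simp only [reduceIte, reduceCtorEq]
          match rs with
          | [] =>
            rw [aLoop.eq_def]; simp
          | c' :: rs' =>
            rw [aLoop.eq_def]
            simp only [reduceIte]
            rw [ih rs' (i+2) (by simp at h ⊢; omega)]
            simp
        · by_cases hq : c = '\''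
          · subst hq
            simp
          · have hih := ih rs (i+1) (by simp at h ⊢; omega)
            simp [hb, hq]
            simpa using hih

theorem quoted_double (text : List Char) :
    ∀ n rest i, rest.length ≤ n →
      aLoop text i rest false true false =
        (match bInner '"' i rest with
         | (_, []) => (("" : String), (none : Option String))
         | (j, _ :: rs') => aLoop text (j+1) rs' false false false) := by
  intro n
  induction n with
  | zero =>
      intro rest i h
      have : rest = [] := List.length_eq_zero_iff.mp (Nat.le_zero.mp h)
      subst this; simp [aLoop, bInner]
  | succ n ih =>
      intro rest i h
      match rest with
      | [] => simp [aLoop, bInner]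
      | c :: rs =>
        rw [aLoop.eq_def, bInner.eq_def]
        by_cases hb : c = '\\'
        · subst hb
          simp only [if_neg (by simp : ¬ (false = true)), reduceIte]
          match rs with
          | [] =>
            rw [aLoop.eq_def]; simp
          | c' :: rs' =>
            rw [aLoop.eq_def]
            simp only [reduceIte]
            rw [ih rs' (i+2) (by simp at h ⊢; omega)]
            simp
        · by_cases hq : c = '"'
          · subst hq
            simp
          · have hih := ih rs (i+1) (by simp at h ⊢; omega)
            simp [hb, hq]
            simpa using hih

theorem main_loop (text : List Char) :
    ∀ n rest i, rest.length ≤ n →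
      aLoop text i rest false false false = bOuter text i rest := by
  intro n
  induction n with
  | zero =>
      intro rest i h
      have : rest = [] := List.length_eq_zero_iff.mp (Nat.le_zero.mp h)
      subst this; simp [aLoop, bOuter]
  | succ n ih =>
      intro rest i h
      match rest with
      | [] => simp [aLoop, bOuter]
      | c :: rs =>
        rw [aLoop.eq_def, bOuter.eq_def]
        by_cases hb : c = '\\'
        · subst hb
          simp only [if_neg (by simp : ¬ (false = true)), reduceIte]
          match rs with
          | [] => rw [aLoop.eq_def]
          | c' :: rs' =>
            rw [aLoop.eq_def]
            simp only [reduceIte]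
            exact ih rs' (i+2) (by simp at h ⊢; omega)
        · by_cases h1 : c = '\''
          · subst h1
            have hqs := quoted_single text rs.length rs (i+1) (le_refl _)
            simp [hqs]
            split
            · rename_i heq
              split
              · rfl
              · rename_i heq2
                rw [heq] at heq2
                simp at heq2
            · rename_i j x rs' heq
              split
              · rename_i heq2
                rw [heq] at heq2
                simp at heq2
              · rename_i j2 x2 rs2' heq2
                rw [heq] at heq2
                obtain ⟨rfl, rfl, rfl⟩ : j = j2 ∧ x = x2 ∧ rs' = rs2' := by simpa using heq2
                have hlen := bInner_len '\'' (i+1) rs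
                rw [heq] at hlen
                exact ih rs' (j+1) (by simp at h hlen ⊢; omega)
          · by_cases h2 : c = '"'
            · subst h2
              have hqs := quoted_double text rs.length rs (i+1) (le_refl _)
              simp [hqs]
              split
              · rename_i heq
                split
                · rfl
                · rename_i heq2
                  rw [heq] at heq2
                  simp at heq2
              · rename_i j x rs' heq
                split
                · rename_i heq2
                  rw [heq] at heq2
                  simp at heq2
                · rename_i j2 x2 rs2' heq2
                  rw [heq] at heq2
                  obtain ⟨rfl, rfl, rfl⟩ : j = j2 ∧ x = x2 ∧ rs' = rs2' := by simpa using heq2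
                  have hlen := bInner_len '"' (i+1) rs
                  rw [heq] at hlen
                  exact ih rs' (j+1) (by simp at h hlen ⊢; omega)
            · by_cases h3 : c = ':'
              · subst h3
                simp [h1, h2]
              · have hih := ih rs (i+1) (by simp at h ⊢; omega)
                simp [hb, h1, h2, h3]
                simpa using hih

-- ===== VERDICT (by name: the statement is the Claim_ definition above) =====
theorem split_key_value_py_spec : Claim_equal_split_key_value_py := by
  intro text _ _
  unfold Spec_split_key_value_py split_key_value_py split_key_value_py_alt
  exact main_loop text.toList text.toList.length text.toList 0 (le_refl _)
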